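-- pv_equiv track=rewrite | github.com/abbydoag/Lab2_Redes | hamming.py | insertar_posiciones_paridad
-- ===== SOURCE A (Python) =====
-- def insertar_posiciones_paridad(mensaje, r):
--     """Inserta ceros en las posiciones de los bits de paridad"""
--     m = len(mensaje)
--     resultado = []
--     indice_mensaje = 0
--
--     for i in range(1, m + r + 1):
--         if i & (i - 1) == 0:  # Si es potencia de 2
--             resultado.append('0')
--         else:
--             if indice_mensaje < m:
--                 resultado.append(mensaje[indice_mensaje])
--                 indice_mensaje += 1
--             else:
--                 resultado.append('0')  # Relleno si es necesario
--     return resultado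
-- ===== SOURCE B (Python) =====
-- def insertar_posiciones_paridad(mensaje, r):
--     """Inserta ceros en las posiciones de paridad insertando en orden ascendente"""
--     n = len(mensaje) + r
--     potencias = []
--     p = 1
--     while p <= n:
--         potencias.append(p)
--         p *= 2
--     ndata = max(0, n - len(potencias))
--     datos = list(mensaje)[:ndata]
--     datos += ['0'] * (ndata - len(datos))
--     for p in potencias:
--         datos.insert(p - 1, '0')
--     return datos
-- ===== Notes on version B (the rewrite author's own statement) =====
-- stated objective: alternative
-- what changed: Instead of A's single pass that decides power-of-two vs data at every position while consuming the message, B first computes the list of power-of-two positions up to m+r, lays out the truncated/zero-padded data block once, and then inserts a '0' at each parity position in ascending order.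
import Mathlib
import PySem

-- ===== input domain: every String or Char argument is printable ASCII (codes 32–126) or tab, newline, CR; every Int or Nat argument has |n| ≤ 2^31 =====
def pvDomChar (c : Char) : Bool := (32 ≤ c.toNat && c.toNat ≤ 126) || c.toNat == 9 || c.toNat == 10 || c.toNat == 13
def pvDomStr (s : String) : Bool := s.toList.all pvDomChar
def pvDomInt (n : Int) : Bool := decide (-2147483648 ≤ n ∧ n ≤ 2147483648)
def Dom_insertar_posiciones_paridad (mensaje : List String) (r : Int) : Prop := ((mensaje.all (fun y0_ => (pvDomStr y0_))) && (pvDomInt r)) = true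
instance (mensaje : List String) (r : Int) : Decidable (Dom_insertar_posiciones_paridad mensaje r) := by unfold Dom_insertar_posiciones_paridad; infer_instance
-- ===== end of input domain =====

-- B builds the data block once and then inserts '0' at each power-of-two position in ascending
-- order, instead of A's position-by-position scan; objective: alternative decomposition (no speed claim).

-- ===== PORT A =====
def insertar_posiciones_paridad (mensaje : List String) (r : Int) : List String :=
  let m : Int := (mensaje.length : Int)
  ((PySem.List.pyRange 1 (m + r + 1) 1).foldl
    (fun (st : List String × Int) i =>
      if PySem.Int.band i (i - 1) = 0 then (st.1 ++ ["0"], st.2)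
      else if st.2 < m then (st.1 ++ [PySem.List.pyGetD mensaje st.2 "0"], st.2 + 1)
      else (st.1 ++ ["0"], st.2)) ([], 0)).1

-- ===== PORT B =====
-- the while loop 'p = 1; while p <= n: potencias.append(p); p *= 2' ('1 ≤ p' in the guard only
-- makes the recursion total; the loop variable is always ≥ 1, so the guard never changes the value)
def pvPotencias (p n : Int) : List Int :=
  if h : 1 ≤ p ∧ p ≤ n then p :: pvPotencias (2 * p) n else []
termination_by (n + 1 - p).toNat
decreasing_by omega

def insertar_posiciones_paridad_alt (mensaje : List String) (r : Int) : List String :=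
  let n : Int := (mensaje.length : Int) + r
  let potencias := pvPotencias 1 n
  let ndata : Int := max 0 (n - potencias.length)
  let d0 := mensaje.take ndata.toNat
  let datos := d0 ++ List.replicate (ndata.toNat - d0.length) "0"
  potencias.foldl (fun acc p => PySem.List.insert acc (p - 1) "0") datos

-- ===== PRECONDITION & SPEC =====
def Spec_insertar_posiciones_paridad (mensaje : List String) (r : Int) (out : List String) : Prop := out = insertar_posiciones_paridad_alt mensaje r
instance (mensaje : List String) (r : Int) (out : List String) : Decidable (Spec_insertar_posiciones_paridad mensaje r out) := by unfold Spec_insertar_posiciones_paridad; infer_instance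

-- ===== CLAIM (what is proved, stated in full; the proofs are below) =====
def Claim_equal_insertar_posiciones_paridad : Prop := ∀ (mensaje : List String) (r : Int), Dom_insertar_posiciones_paridad mensaje r → Spec_insertar_posiciones_paridad mensaje r (insertar_posiciones_paridad mensaje r)

-- ===== LEMMAS AND PROOFS =====

theorem pvPot_elem_aux (n : Int) : ∀ (d : Nat) (p : Int), (n + 1 - p).toNat ≤ d → 1 ≤ p →
    ∀ (i : Nat) (hi : i < (pvPotencias p n).length),
    (pvPotencias p n)[i] = p * 2^i ∧ p * 2^i ≤ n := by
  intro d
  induction d with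
  | zero =>
    intro p hd hp i hi
    rw [pvPotencias, dif_neg (by omega)] at hi
    simp at hi
  | succ d ih =>
    intro p hd hp i hi
    by_cases h : 1 ≤ p ∧ p ≤ n
    · have hE : pvPotencias p n = p :: pvPotencias (2 * p) n := by
        rw [pvPotencias, dif_pos h]
      simp only [hE] at hi ⊢
      match i with
      | 0 => simpa using h.2
      | (j+1) =>
        simp only [List.getElem_cons_succ]
        have := ih (2*p) (by omega) (by omega) j (by simpa using hi)
        refine ⟨by rw [this.1]; ring, ?_⟩
        have h2 := this.2
        have h3 : (2:Int)^(j+1) = 2 * 2^j := by ring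
        nlinarith
    · rw [pvPotencias, dif_neg h] at hi
      simp at hi

theorem pvPot_elem (n p : Int) (hp : 1 ≤ p) (i : Nat) (hi : i < (pvPotencias p n).length) :
    (pvPotencias p n)[i] = p * 2^i ∧ p * 2^i ≤ n :=
  pvPot_elem_aux n (n + 1 - p).toNat p le_rfl hp i hi

theorem pvPot_succ_aux (n : Int) (hn : 0 ≤ n) : ∀ (d : Nat) (p : Int), (n + 2 - p).toNat ≤ d → 1 ≤ p →
    ((∃ k : Nat, n + 1 = p * 2^k) → pvPotencias p (n+1) = pvPotencias p n ++ [n+1]) ∧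
    ((¬ ∃ k : Nat, n + 1 = p * 2^k) → pvPotencias p (n+1) = pvPotencias p n) := by
  intro d
  induction d with
  | zero =>
    intro p hd hp
    have hne : ¬ ∃ k : Nat, n + 1 = p * 2^k := by
      rintro ⟨k, hk⟩
      have hp2 : n + 2 ≤ p := by omega
      have h1 := pow_pos (show (0:Int) < 2 by norm_num) k
      have h2 : p * 1 ≤ p * 2 ^ k := by
        apply mul_le_mul_of_nonneg_left (by omega) (by omega)
      linarith
    refine ⟨fun h => absurd h hne, fun _ => ?_⟩
    rw [pvPotencias, dif_neg (by omega), pvPotencias, dif_neg (by omega)]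
  | succ d ih =>
    intro p hd hp
    rcases lt_trichotomy p (n+1) with hlt | heq | hgt
    · -- p ≤ n : both sides unfold to p :: _
      have hshift : (∃ k : Nat, n + 1 = p * 2^k) ↔ (∃ k : Nat, n + 1 = 2 * p * 2^k) := by
        constructor
        · rintro ⟨k, hk⟩
          match k with
          | 0 => simp at hk; omega
          | (j+1) => exact ⟨j, by rw [hk]; ring⟩
        · rintro ⟨k, hk⟩; exact ⟨k+1, by rw [hk]; ring⟩
      have ihh := ih (2*p) (by omega) (by omega)
      constructor
      · intro hk
        rw [pvPotencias, dif_pos ⟨hp, by omega⟩]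
        conv_rhs => rw [pvPotencias, dif_pos ⟨hp, by omega⟩]
        simp only [List.cons_append, List.cons.injEq, true_and]
        exact ihh.1 (hshift.1 hk)
      · intro hk
        rw [pvPotencias, dif_pos ⟨hp, by omega⟩]
        conv_rhs => rw [pvPotencias, dif_pos ⟨hp, by omega⟩]
        simp only [List.cons.injEq, true_and]
        exact ihh.2 (fun h => hk (hshift.2 h))
    · -- p = n+1
      constructor
      · intro _
        rw [pvPotencias, dif_pos ⟨hp, by omega⟩, pvPotencias, dif_neg (by omega),
          pvPotencias, dif_neg (by omega)]
        simp [heq]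
      · intro hk
        exact absurd ⟨0, by simp [heq]⟩ hk
    · -- p > n+1 : both empty; condition impossible
      have hne : ¬ ∃ k : Nat, n + 1 = p * 2^k := by
        rintro ⟨k, hk⟩
        have h1 := pow_pos (show (0:Int) < 2 by norm_num) k
        have h2 : p * 1 ≤ p * 2 ^ k := by
          apply mul_le_mul_of_nonneg_left (by omega) (by omega)
        linarith
      refine ⟨fun h => absurd h hne, fun _ => ?_⟩
      rw [pvPotencias, dif_neg (by omega), pvPotencias, dif_neg (by omega)]

theorem pvPot_succ (n : Int) (hn : 0 ≤ n) :
    ((∃ k : Nat, n + 1 = 2^k) → pvPotencias 1 (n+1) = pvPotencias 1 n ++ [n+1]) ∧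
    ((¬ ∃ k : Nat, n + 1 = 2^k) → pvPotencias 1 (n+1) = pvPotencias 1 n) := by
  have := pvPot_succ_aux n hn (n + 2 - 1).toNat 1 le_rfl le_rfl
  simpa using this

theorem pvTwoPow_nat (i j : Nat) (h : i ≤ j) : 2^i + j ≤ 2^j + i := by
  induction j with
  | zero =>
    have : i = 0 := by omega
    simp [this]
  | succ j ih =>
    rcases Nat.eq_or_lt_of_le h with rfl | hlt
    · omega
    · have := ih (by omega)
      have h1 : (1:Nat) ≤ 2^j := Nat.one_le_two_pow
      have : 2^(j+1) = 2^j + 2^j := by ring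
      omega

theorem pvL_le (n : Int) (hn : 0 ≤ n) : ((pvPotencias 1 n).length : Int) ≤ n := by
  rcases Nat.eq_zero_or_pos (pvPotencias 1 n).length with h0 | hpos
  · omega
  · have hlast := pvPot_elem n 1 le_rfl ((pvPotencias 1 n).length - 1) (by omega)
    have h2 := pvTwoPow_nat 0 ((pvPotencias 1 n).length - 1) (by omega)
    have h3 : ((2:Nat) ^ ((pvPotencias 1 n).length - 1) : Int) = (2:Int) ^ ((pvPotencias 1 n).length - 1) := by
      push_cast; ring
    have h4 := hlast.2
    rw [one_mul] at h4
    omega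

theorem pvKey (n : Int) (_hn : 0 ≤ n) (i : Nat) (hi : i < (pvPotencias 1 n).length) :
    1 ≤ (pvPotencias 1 n)[i] ∧
    (pvPotencias 1 n)[i] - 1 ≤ (n - (pvPotencias 1 n).length) + i := by
  have he := pvPot_elem n 1 le_rfl i hi
  rw [one_mul] at he
  have hlast := pvPot_elem n 1 le_rfl ((pvPotencias 1 n).length - 1) (by omega)
  rw [one_mul] at hlast
  have h2 := pvTwoPow_nat i ((pvPotencias 1 n).length - 1) (by omega)
  have hc : ∀ j : Nat, ((2:Nat) ^ j : Int) = (2:Int) ^ j := by intro j; push_cast; ring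
  have h3 := hc i
  have h4 := hc ((pvPotencias 1 n).length - 1)
  have h5 := hlast.2
  have h6 := he.1
  have h1 : (1:Nat) ≤ 2^i := Nat.one_le_two_pow
  omega

theorem pvFoldIns_length : ∀ (l : List Int) (xs : List String),
    (l.foldl (fun acc q => PySem.List.insert acc (q - 1) "0") xs).length = xs.length + l.length := by
  intro l
  induction l with
  | nil => simp
  | cons q t ih =>
    intro xs
    simp only [List.foldl_cons, ih, PySem.List.length_insert, List.length_cons]
    omega

theorem pvFoldIns_append : ∀ (l : List Int) (xs : List String) (d : String),
    (∀ (i : Nat) (h : i < l.length), 1 ≤ l[i] ∧ l[i] - 1 ≤ (xs.length : Int) + i) →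
    l.foldl (fun acc q => PySem.List.insert acc (q - 1) "0") (xs ++ [d])
      = (l.foldl (fun acc q => PySem.List.insert acc (q - 1) "0") xs) ++ [d] := by
  intro l
  induction l with
  | nil => intro xs d _; rfl
  | cons q t ih =>
    intro xs d H
    have h0 := H 0 (by simp)
    simp only [List.getElem_cons_zero] at h0
    have hj : q - 1 = ((q - 1).toNat : Int) := by omega
    have hjle : (q - 1).toNat ≤ xs.length := by omega
    simp only [List.foldl_cons]
    rw [hj, PySem.List.insert_natCast _ _ _ (by simp; omega),
        PySem.List.insert_natCast _ _ _ hjle,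
        List.take_append_of_le_length hjle, List.drop_append_of_le_length hjle]
    rw [show List.take (q-1).toNat xs ++ "0" :: (List.drop (q-1).toNat xs ++ [d])
        = (List.take (q-1).toNat xs ++ "0" :: List.drop (q-1).toNat xs) ++ [d] by simp]
    apply ih
    intro i hi
    have := H (i+1) (by simpa using hi)
    simp only [List.getElem_cons_succ] at this
    have hlen : (List.take (q-1).toNat xs ++ "0" :: List.drop (q-1).toNat xs).length = xs.length + 1 := by
      simp
    rw [hlen]
    constructor
    · exact this.1
    · push_cast
      have := this.2
      push_cast at this
      omega

def pvDatos (mensaje : List String) (nd : Nat) : List String :=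
  mensaje.take nd ++ List.replicate (nd - (mensaje.take nd).length) "0"

theorem pvDatos_length (mensaje : List String) (nd : Nat) : (pvDatos mensaje nd).length = nd := by
  simp [pvDatos]

theorem pvDatos_succ (mensaje : List String) (nd : Nat) :
    pvDatos mensaje (nd + 1) = pvDatos mensaje nd ++ [PySem.List.pyGetD mensaje (nd : Int) "0"] := by
  rw [PySem.List.pyGetD_natCast]
  by_cases h : nd < mensaje.length
  · have hlen : (mensaje.take nd).length = nd := by simp [List.length_take]; omega
    have hlen1 : (mensaje.take (nd+1)).length = nd+1 := by simp [List.length_take]; omega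
    have hg : mensaje.getD nd "0" = mensaje[nd] := List.getD_eq_getElem _ _ h
    have ht : mensaje.take (nd+1) = mensaje.take nd ++ [mensaje[nd]] := by
      rw [List.take_add_one, List.getElem?_eq_getElem h]
      rfl
    unfold pvDatos
    rw [hlen1, hlen, Nat.sub_self, Nat.sub_self, ht, hg]
    simp
  · have hm : mensaje.length ≤ nd := by omega
    have h1 : mensaje.take nd = mensaje := List.take_of_length_le (by omega)
    have h2 : mensaje.take (nd+1) = mensaje := List.take_of_length_le (by omega)
    have hg : mensaje.getD nd "0" = "0" := by
      simp [List.getD, List.getElem?_eq_none hm]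
    simp only [pvDatos, h1, h2, hg]
    rw [show nd + 1 - mensaje.length = (nd - mensaje.length) + 1 by omega, List.replicate_succ']
    simp


theorem pvPow2_nat : ∀ a : Nat, 1 ≤ a → ((a &&& (a-1)) = 0 ↔ ∃ k : Nat, a = 2^k) := by
  intro a
  induction a using Nat.strong_induction_on with
  | _ a IH =>
    intro ha
    constructor
    · intro h
      rcases Nat.lt_or_ge a 2 with h2 | h2
      · exact ⟨0, by omega⟩
      rcases Nat.even_or_odd a with ⟨b, hb⟩ | ⟨b, hb⟩
      · -- a = 2b
        have hb1 : 1 ≤ b := by omega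
        have hdiv : a / 2 = b := by omega
        have hdiv' : (a-1) / 2 = b - 1 := by omega
        have hz : b &&& (b-1) = 0 := by
          apply Nat.zero_of_testBit_eq_false
          intro i
          have h0 : (a &&& (a-1)).testBit (i+1) = false := by rw [h]; exact Nat.zero_testBit _
          rwa [Nat.testBit_land, Nat.testBit_add_one, Nat.testBit_add_one, hdiv, hdiv',
            ← Nat.testBit_land] at h0
        obtain ⟨k, hk⟩ := (IH b (by omega) hb1).1 hz
        exact ⟨k+1, by rw [pow_succ]; omega⟩
      · -- a = 2b+1, b ≥ 1 : contradiction
        exfalso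
        have hb1 : 1 ≤ b := by omega
        obtain ⟨j, hj⟩ := Nat.exists_testBit_of_ne_zero (show b ≠ 0 by omega)
        have hdiv : a / 2 = b := by omega
        have hdiv' : (a-1) / 2 = b := by omega
        have h0 : (a &&& (a-1)).testBit (j+1) = false := by rw [h]; exact Nat.zero_testBit _
        rw [Nat.testBit_land, Nat.testBit_add_one, Nat.testBit_add_one, hdiv, hdiv', hj] at h0
        simp at h0
    · rintro ⟨k, rfl⟩
      rw [Nat.and_two_pow_sub_one_eq_mod, Nat.mod_self]

theorem pvPow2_int (a : Nat) (ha : 1 ≤ a) :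
    (PySem.Int.band (a : Int) ((a : Int) - 1) = 0 ↔ ∃ k : Nat, (a : Int) = 2^k) := by
  have h1 : ((a : Int) - 1) = ((a - 1 : Nat) : Int) := by omega
  rw [h1, PySem.Int.band_natCast]
  constructor
  · intro h
    obtain ⟨k, hk⟩ := (pvPow2_nat a ha).1 (by exact_mod_cast h)
    exact ⟨k, by exact_mod_cast hk⟩
  · rintro ⟨k, hk⟩
    have h2 : a = 2^k := by exact_mod_cast hk
    have := (pvPow2_nat a ha).2 ⟨k, h2⟩
    exact_mod_cast this

theorem pvMain (mensaje : List String) : ∀ (n : Int), 0 ≤ n →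
    (PySem.List.pyRange 1 (n+1) 1).foldl
      (fun (st : List String × Int) i =>
        if PySem.Int.band i (i - 1) = 0 then (st.1 ++ ["0"], st.2)
        else if st.2 < (mensaje.length : Int) then (st.1 ++ [PySem.List.pyGetD mensaje st.2 "0"], st.2 + 1)
        else (st.1 ++ ["0"], st.2)) ([], 0)
    = ((pvPotencias 1 n).foldl (fun acc q => PySem.List.insert acc (q - 1) "0")
         (pvDatos mensaje (n - (pvPotencias 1 n).length).toNat),
       min (mensaje.length : Int) (n - (pvPotencias 1 n).length)) := by
  intro n hn
  induction n, hn using Int.le_induction with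
  | base =>
    have hpot : pvPotencias 1 0 = [] := by rw [pvPotencias, dif_neg (by omega)]
    rw [PySem.List.pyRange_one_eq_nil (by norm_num), hpot]
    simp [pvDatos]
  | succ n hn ih =>
    have hL : ((pvPotencias 1 n).length : Int) ≤ n := pvL_le n hn
    have hrange : PySem.List.pyRange 1 (n+1+1) 1 = PySem.List.pyRange 1 (n+1) 1 ++ [n+1] :=
      PySem.List.pyRange_one_succ_right (by omega)
    rw [hrange, List.foldl_append, ih]
    simp only [List.foldl_cons, List.foldl_nil]
    have hb : (PySem.Int.band (n+1) ((n+1) - 1) = 0) ↔ ∃ k : Nat, n + 1 = (2:Int)^k := by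
      have ha : (((n+1).toNat : Nat) : Int) = n + 1 := by omega
      have h2 := pvPow2_int (n+1).toNat (by omega)
      rw [ha] at h2
      exact h2
    by_cases hP : ∃ k : Nat, n + 1 = (2:Int)^k
    · -- parity position
      rw [if_pos (hb.2 hP)]
      have hpot := (pvPot_succ n hn).1 hP
      rw [hpot]
      have hlen : ((pvPotencias 1 n ++ [n+1]).length : Int) = (pvPotencias 1 n).length + 1 := by
        simp
      rw [hlen]
      have hnd : (n + 1 - ((pvPotencias 1 n).length + 1)) = n - (pvPotencias 1 n).length := by ring
      rw [hnd, List.foldl_append]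
      simp only [List.foldl_cons, List.foldl_nil]
      set B' := (pvPotencias 1 n).foldl (fun acc q => PySem.List.insert acc (q - 1) "0")
        (pvDatos mensaje (n - (pvPotencias 1 n).length).toNat) with hB
      have hBlen : (B'.length : Int) = n := by
        rw [hB, pvFoldIns_length, pvDatos_length]
        omega
      have hins : PySem.List.insert B' (n + 1 - 1) "0" = B' ++ ["0"] := by
        rw [show (n + 1 - 1 : Int) = ((B'.length : Nat) : Int) by omega,
          PySem.List.insert_natCast _ _ _ le_rfl]
        simp
      rw [hins]
    · -- data position
      rw [if_neg (fun h => hP (hb.1 h))]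
      have hpot := (pvPot_succ n hn).2 hP
      rw [hpot]
      have hnd : (n + 1 - ((pvPotencias 1 n).length : Int)).toNat
          = (n - ((pvPotencias 1 n).length : Int)).toNat + 1 := by omega
      rw [hnd, pvDatos_succ]
      have hfold := pvFoldIns_append (pvPotencias 1 n)
        (pvDatos mensaje (n - ((pvPotencias 1 n).length : Int)).toNat)
        (PySem.List.pyGetD mensaje ((n - ((pvPotencias 1 n).length : Int)).toNat : Int) "0")
        (by
          intro i hi
          have hk := pvKey n hn i hi
          rw [pvDatos_length]
          refine ⟨hk.1, ?_⟩
          have := hk.2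
          omega)
      rw [hfold]
      have hcast : (((n - ((pvPotencias 1 n).length : Int)).toNat : Nat) : Int)
          = n - (pvPotencias 1 n).length := by omega
      rw [hcast]
      by_cases hm : n - ((pvPotencias 1 n).length : Int) < (mensaje.length : Int)
      · rw [if_pos (by omega), Prod.mk.injEq]
        refine ⟨?_, by omega⟩
        rw [show min ((mensaje.length : Nat) : Int) (n - ((pvPotencias 1 n).length : Int))
            = n - ((pvPotencias 1 n).length : Int) by omega]
      · rw [if_neg (by omega), Prod.mk.injEq]
        refine ⟨?_, by omega⟩
        rw [← hcast, PySem.List.pyGetD_natCast,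
          List.getD_eq_default _ _ (show mensaje.length ≤ (n - ((pvPotencias 1 n).length : Int)).toNat by omega)]

theorem pvFinal (mensaje : List String) (r : Int) :
    insertar_posiciones_paridad mensaje r = insertar_posiciones_paridad_alt mensaje r := by
  unfold insertar_posiciones_paridad insertar_posiciones_paridad_alt
  simp only []
  by_cases hn : 0 ≤ (mensaje.length : Int) + r
  · have hmain := pvMain mensaje ((mensaje.length : Int) + r) hn
    have hL := pvL_le ((mensaje.length : Int) + r) hn
    have hmax : max 0 ((mensaje.length : Int) + r - (pvPotencias 1 ((mensaje.length : Int) + r)).length)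
        = (mensaje.length : Int) + r - (pvPotencias 1 ((mensaje.length : Int) + r)).length := by omega
    rw [hmax]
    have hdat : pvDatos mensaje (((mensaje.length : Int) + r - (pvPotencias 1 ((mensaje.length : Int) + r)).length)).toNat
        = mensaje.take (((mensaje.length : Int) + r - (pvPotencias 1 ((mensaje.length : Int) + r)).length)).toNat
          ++ List.replicate ((((mensaje.length : Int) + r - (pvPotencias 1 ((mensaje.length : Int) + r)).length)).toNat
              - (mensaje.take (((mensaje.length : Int) + r - (pvPotencias 1 ((mensaje.length : Int) + r)).length)).toNat).length) "0" := rfl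
    rw [← hdat]
    rw [show (mensaje.length : Int) + r + 1 = ((mensaje.length : Int) + r) + 1 by ring, hmain]
  · have hpot : pvPotencias 1 ((mensaje.length : Int) + r) = [] := by
      rw [pvPotencias, dif_neg (by omega)]
    rw [PySem.List.pyRange_one_eq_nil (by omega), hpot]
    have hmax : max 0 ((mensaje.length : Int) + r - ([] : List Int).length) = 0 := by
      simp; omega
    rw [hmax]
    simp

-- ===== VERDICT (by name: the statement is the Claim_ definition above) =====
theorem insertar_posiciones_paridad_spec : Claim_equal_insertar_posiciones_paridad := by
  intro mensaje r _
  unfold Spec_insertar_posiciones_paridad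
  exact pvFinal mensaje r
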